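-- pv_equiv track=rewrite | github.com/lekhoi0702/ticketbooking | generate_seats_inserts_full.py | generate_seats_for_ticket_type
-- ===== SOURCE A (Python) =====
-- import math
--
-- def get_row_letter(row_index):
--     """Convert row index (1-based) to letter (A, B, C, ..., Z, AA, AB, ...)"""
--     alphabet = 'ABCDEFGHIJKLMNOPQRSTUVWXYZ'
--     if row_index <= 26:
--         return alphabet[row_index - 1]
--     elif row_index <= 52:
--         return 'A' + alphabet[row_index - 27]
--     else:
--         return 'B' + alphabet[row_index - 53]
--
-- def generate_seats_for_ticket_type(ticket_type_id, quantity, area_name, start_seat_id):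
--     """Generate INSERT statements for seats"""
--     inserts = []
--     seat_id = start_seat_id
--
--     # Calculate layout (square-ish)
--     cols = math.ceil(math.sqrt(quantity))
--     rows = math.ceil(quantity / cols)
--
--     seats_created = 0
--     for row_idx in range(1, rows + 1):
--         if seats_created >= quantity:
--             break
--         row_letter = get_row_letter(row_idx)
--         for col_idx in range(1, cols + 1):
--             if seats_created >= quantity:
--                 break
--             insert = f"({seat_id}, {ticket_type_id}, '{row_letter}', '{col_idx}', 'AVAILABLE', 1, '{area_name}', {col_idx}, {row_idx})"
--             inserts.append(insert)
--             seat_id += 1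
--             seats_created += 1
--
--     return inserts, seat_id
-- ===== SOURCE B (Python) =====
-- import math
--
-- def get_row_letter(row_index):
--     """Convert row index (1-based) to letter (A, B, C, ..., Z, AA, AB, ...)"""
--     alphabet = 'ABCDEFGHIJKLMNOPQRSTUVWXYZ'
--     if row_index <= 26:
--         return alphabet[row_index - 1]
--     elif row_index <= 52:
--         return 'A' + alphabet[row_index - 27]
--     else:
--         return 'B' + alphabet[row_index - 53]
--
-- def generate_seats_for_ticket_type(ticket_type_id, quantity, area_name, start_seat_id):
--     """Generate INSERT statements for seats: one flat pass with index arithmetic."""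
--     cols = math.ceil(math.sqrt(quantity))
--     inserts = []
--     for i in range(quantity):
--         row_idx = i // cols + 1
--         col_idx = i % cols + 1
--         row_letter = get_row_letter(row_idx)
--         inserts.append(
--             f"({start_seat_id + i}, {ticket_type_id}, '{row_letter}', '{col_idx}', 'AVAILABLE', 1, '{area_name}', {col_idx}, {row_idx})"
--         )
--     return inserts, start_seat_id + quantity
-- ===== Notes on version B (the rewrite author's own statement) =====
-- stated objective: simpler
-- what changed: Replaced the two-level row/column loop with breaks by one flat pass over range(quantity) computing row/column by i//cols and i%cols, and dropped the unused rows bookkeeping; the final seat id is start_seat_id + quantity by arithmetic.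
-- crash fix: On quantity == 0 A raises ZeroDivisionError (rows = ceil(0/0)); B returns ([], start_seat_id). — e.g. on generate_seats_for_ticket_type(1, 0, "X", 5): A raises ZeroDivisionError, B returns ([], 5)
import Mathlib
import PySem

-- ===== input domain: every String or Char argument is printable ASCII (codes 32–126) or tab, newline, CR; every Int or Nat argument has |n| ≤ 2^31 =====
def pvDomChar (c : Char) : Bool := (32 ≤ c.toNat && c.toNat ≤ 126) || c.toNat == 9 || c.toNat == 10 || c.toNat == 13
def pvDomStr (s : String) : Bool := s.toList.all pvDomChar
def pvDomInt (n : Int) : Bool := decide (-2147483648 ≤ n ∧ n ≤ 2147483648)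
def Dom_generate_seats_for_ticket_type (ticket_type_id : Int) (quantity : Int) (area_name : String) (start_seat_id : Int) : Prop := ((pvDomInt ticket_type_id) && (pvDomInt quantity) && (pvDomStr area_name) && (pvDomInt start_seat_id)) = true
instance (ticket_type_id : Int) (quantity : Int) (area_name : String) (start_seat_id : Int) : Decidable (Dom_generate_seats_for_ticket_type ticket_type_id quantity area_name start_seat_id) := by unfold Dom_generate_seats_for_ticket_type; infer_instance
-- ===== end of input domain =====

-- B replaces A's nested row/column loop with breaks by one flat indexed pass (same output, same cost).


-- ===== PORT A =====
-- shared helper of both Pythons (same module): row index → letter label.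
-- Python raises IndexError where pyGet? is none (row_index > 78); those inputs are outside Pre_.
def get_row_letter (row_index : Int) : String :=
  let alphabet := "ABCDEFGHIJKLMNOPQRSTUVWXYZ"
  if row_index ≤ 26 then ((PySem.Str.pyGet? alphabet (row_index - 1)).map String.singleton).getD ""
  else if row_index ≤ 52 then "A" ++ ((PySem.Str.pyGet? alphabet (row_index - 27)).map String.singleton).getD ""
  else "B" ++ ((PySem.Str.pyGet? alphabet (row_index - 53)).map String.singleton).getD ""

-- the f-string both Pythons build, literally
def seatInsert (seat_id ticket_type_id : Int) (row_letter : String) (col_idx : Int) (area_name : String) (row_idx : Int) : String :=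
  "(" ++ PySem.Int.toStr seat_id ++ ", " ++ PySem.Int.toStr ticket_type_id ++ ", '" ++ row_letter
    ++ "', '" ++ PySem.Int.toStr col_idx ++ "', 'AVAILABLE', 1, '" ++ area_name ++ "', "
    ++ PySem.Int.toStr col_idx ++ ", " ++ PySem.Int.toStr row_idx ++ ")"

-- math.ceil(math.sqrt(quantity)); exact for 0 ≤ quantity ≤ 2^31 (the float sqrt cannot cross an integer there);
-- value for quantity < 0 is irrelevant (Python raises ValueError there, outside Pre_).
-- floor integer sqrt (largest k with k*k ≤ n), kernel-reducible; math.sqrt is float but agrees here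
def pvSqrtDown (n : Nat) : Nat → Nat
  | 0 => 0
  | k + 1 => if (k + 1) * (k + 1) ≤ n then k + 1 else pvSqrtDown n k

def pvCeilSqrt (quantity : Int) : Int :=
  if pvSqrtDown quantity.toNat quantity.toNat * pvSqrtDown quantity.toNat quantity.toNat = quantity.toNat
  then (pvSqrtDown quantity.toNat quantity.toNat : Int) else ((pvSqrtDown quantity.toNat quantity.toNat : Int) + 1)

-- inner 'for col_idx in range(1, cols + 1)' with its break; state = (inserts, seat_id, seats_created)
def pvInnerA (ttid : Int) (area : String) (q : Int) (rletter : String) (ridx : Int) :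
    List Int → List String × Int × Int → List String × Int × Int
  | [], st => st
  | c :: cs, (ins, sid, sc) =>
      if sc ≥ q then (ins, sid, sc)
      else pvInnerA ttid area q rletter ridx cs (ins ++ [seatInsert sid ttid rletter c area ridx], sid + 1, sc + 1)

-- outer 'for row_idx in range(1, rows + 1)' with its break
def pvOuterA (ttid : Int) (area : String) (q cols : Int) :
    List Int → List String × Int × Int → List String × Int × Int
  | [], st => st
  | r :: rs, st =>
      if st.2.2 ≥ q then st
      else pvOuterA ttid area q cols rs (pvInnerA ttid area q (get_row_letter r) r (PySem.List.pyRange 1 (cols + 1) 1) st)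

def generate_seats_for_ticket_type (ticket_type_id : Int) (quantity : Int) (area_name : String) (start_seat_id : Int) : List String × Int :=
  let cols := pvCeilSqrt quantity
  -- math.ceil(quantity / cols); exact on this domain (true quotient never rounds across an integer)
  let rows := -(PySem.Int.floordiv (-quantity) cols)
  let st := pvOuterA ticket_type_id area_name quantity cols (PySem.List.pyRange 1 (rows + 1) 1) ([], start_seat_id, 0)
  (st.1, st.2.1)

-- ===== PORT B =====
-- 'for i in range(quantity)': flat pass, row/col by floor-div and mod
def pvLoopB (ttid : Int) (area : String) (cols start : Int) : List Int → List String → List String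
  | [], ins => ins
  | i :: is, ins =>
      let ridx := PySem.Int.floordiv i cols + 1
      let cidx := PySem.Int.mod i cols + 1
      pvLoopB ttid area cols start is (ins ++ [seatInsert (start + i) ttid (get_row_letter ridx) cidx area ridx])

def generate_seats_for_ticket_type_alt (ticket_type_id : Int) (quantity : Int) (area_name : String) (start_seat_id : Int) : List String × Int :=
  let cols := pvCeilSqrt quantity
  (pvLoopB ticket_type_id area_name cols start_seat_id (PySem.List.pyRange 0 quantity 1) [], start_seat_id + quantity)

-- ===== PRECONDITION & SPEC =====
-- Pre_ = exactly the inputs where Python A returns: quantity ≥ 1 (ZeroDivisionError at 0, ValueError below),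
-- and quantity ≤ 6162, the largest quantity with ceil(quantity/cols) ≤ 78 rows (get_row_letter raises IndexError past row 78).
def Pre_generate_seats_for_ticket_type (ticket_type_id : Int) (quantity : Int) (area_name : String) (start_seat_id : Int) : Prop :=
  1 ≤ quantity ∧ quantity ≤ 6162
instance (ticket_type_id : Int) (quantity : Int) (area_name : String) (start_seat_id : Int) : Decidable (Pre_generate_seats_for_ticket_type ticket_type_id quantity area_name start_seat_id) := by unfold Pre_generate_seats_for_ticket_type; infer_instance
def pvWitness_generate_seats_for_ticket_type : Int × Int × String × Int := (2, 7, "VIP", 100)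

-- On quantity == 0 A raises ZeroDivisionError (rows = ceil(0/0)); B returns ([], start_seat_id).
def Raises_generate_seats_for_ticket_type (ticket_type_id : Int) (quantity : Int) (area_name : String) (start_seat_id : Int) : Prop := quantity = 0
instance (ticket_type_id : Int) (quantity : Int) (area_name : String) (start_seat_id : Int) : Decidable (Raises_generate_seats_for_ticket_type ticket_type_id quantity area_name start_seat_id) := by unfold Raises_generate_seats_for_ticket_type; infer_instance
def pvRaiseWitness_generate_seats_for_ticket_type : Int × Int × String × Int := (1, 0, "X", 5)
def pvRaiseWitnessOut_generate_seats_for_ticket_type : List String × Int := ([], 5)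

def Spec_generate_seats_for_ticket_type (ticket_type_id : Int) (quantity : Int) (area_name : String) (start_seat_id : Int) (out : List String × Int) : Prop := out = generate_seats_for_ticket_type_alt ticket_type_id quantity area_name start_seat_id
instance (ticket_type_id : Int) (quantity : Int) (area_name : String) (start_seat_id : Int) (out : List String × Int) : Decidable (Spec_generate_seats_for_ticket_type ticket_type_id quantity area_name start_seat_id out) := by unfold Spec_generate_seats_for_ticket_type; infer_instance

-- ===== CLAIM =====
def Claim_equal_generate_seats_for_ticket_type : Prop := ∀ (ticket_type_id : Int) (quantity : Int) (area_name : String) (start_seat_id : Int), Dom_generate_seats_for_ticket_type ticket_type_id quantity area_name start_seat_id → Pre_generate_seats_for_ticket_type ticket_type_id quantity area_name start_seat_id → Spec_generate_seats_for_ticket_type ticket_type_id quantity area_name start_seat_id (generate_seats_for_ticket_type ticket_type_id quantity area_name start_seat_id)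
def Claim_raises_generate_seats_for_ticket_type : Prop := (∀ (ticket_type_id : Int) (quantity : Int) (area_name : String) (start_seat_id : Int), Dom_generate_seats_for_ticket_type ticket_type_id quantity area_name start_seat_id → Raises_generate_seats_for_ticket_type ticket_type_id quantity area_name start_seat_id → ¬ Pre_generate_seats_for_ticket_type ticket_type_id quantity area_name start_seat_id) ∧ (Dom_generate_seats_for_ticket_type (pvRaiseWitness_generate_seats_for_ticket_type.1) (pvRaiseWitness_generate_seats_for_ticket_type.2.1) (pvRaiseWitness_generate_seats_for_ticket_type.2.2.1) (pvRaiseWitness_generate_seats_for_ticket_type.2.2.2) ∧ Raises_generate_seats_for_ticket_type (pvRaiseWitness_generate_seats_for_ticket_type.1) (pvRaiseWitness_generate_seats_for_ticket_type.2.1) (pvRaiseWitness_generate_seats_for_ticket_type.2.2.1) (pvRaiseWitness_generate_seats_for_ticket_type.2.2.2) ∧ generate_seats_for_ticket_type_alt (pvRaiseWitness_generate_seats_for_ticket_type.1) (pvRaiseWitness_generate_seats_for_ticket_type.2.1) (pvRaiseWitness_generate_seats_for_ticket_type.2.2.1) (pvRaiseWitness_generate_seats_for_ticket_type.2.2.2)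 = pvRaiseWitnessOut_generate_seats_for_ticket_type)

-- ===== LEMMAS AND PROOFS =====

-- the per-seat string as a function of the flat index
def pvSeat (ttid : Int) (area : String) (cols start : Int) (i : Int) : String :=
  seatInsert (start + i) ttid (get_row_letter (PySem.Int.floordiv i cols + 1)) (PySem.Int.mod i cols + 1) area (PySem.Int.floordiv i cols + 1)

theorem pvLoopB_eq (ttid : Int) (area : String) (cols start : Int) :
    ∀ (l : List Int) (ins : List String),
      pvLoopB ttid area cols start l ins = ins ++ l.map (pvSeat ttid area cols start) := by
  intro l
  induction l with
  | nil => intro ins; simp [pvLoopB]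
  | cons i is ih => intro ins; simp [pvLoopB, ih, pvSeat]

theorem pvInnerA_eq (ttid : Int) (area : String) (q cols r : Int) (start : Int)
    (hcols : 1 ≤ cols) (hr : 1 ≤ r) :
    ∀ (n : Nat) (j : Int), 0 ≤ j → j ≤ cols → (cols - j).toNat = n →
      (r - 1) * cols + j ≤ q →
      ∀ ins,
        pvInnerA ttid area q (get_row_letter r) r (PySem.List.pyRange (j + 1) (cols + 1) 1)
          (ins, start + ((r - 1) * cols + j), (r - 1) * cols + j)
        = (ins ++ (PySem.List.pyRange ((r - 1) * cols + j) (min q (r * cols)) 1).map (pvSeat ttid area cols start),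
           start + min q (r * cols), min q (r * cols)) := by
  intro n
  induction n with
  | zero =>
    intro j hj0 hjc hn hq ins
    have hjcols : j = cols := by omega
    rw [PySem.List.pyRange_one_eq_nil (by omega)]
    have hrc : r * cols = (r - 1) * cols + j := by rw [hjcols]; ring
    have hm : min q (r * cols) = (r - 1) * cols + j := by rw [hrc]; exact min_eq_right hq
    simp only [pvInnerA, hm]
    rw [PySem.List.pyRange_one_eq_nil (le_refl _)]
    simp
  | succ n ih =>
    intro j hj0 hjc hn hq ins
    have hjlt : j < cols := by omega
    have hrc : (r - 1) * cols + cols = r * cols := by ring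
    rw [PySem.List.pyRange_one_cons (by omega)]
    simp only [pvInnerA]
    by_cases hbreak : (r - 1) * cols + j ≥ q
    · -- seats_created = quantity: break
      have hsc : (r - 1) * cols + j = q := le_antisymm hq hbreak
      have hm : min q (r * cols) = q := min_eq_left (by linarith)
      simp [hsc, hm, PySem.List.pyRange_one_eq_nil (le_refl q)]
    · simp only [hbreak, if_false]
      have hscq : (r - 1) * cols + j < q := lt_of_not_ge hbreak
      have hdiv : PySem.Int.floordiv ((r - 1) * cols + j) cols = r - 1 := by
        rw [PySem.Int.floordiv_eq_iff_of_pos (by omega)]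
        exact ⟨by linarith, by linarith⟩
      have hmod : PySem.Int.mod ((r - 1) * cols + j) cols = j := by
        have h := PySem.Int.floordiv_mul_add_mod ((r - 1) * cols + j) cols
        rw [hdiv] at h; linarith
      have step := ih (j + 1) (by omega) (by omega) (by omega) (by linarith)
        (ins ++ [seatInsert (start + ((r - 1) * cols + j)) ttid (get_row_letter r) (j + 1) area r])
      rw [show start + ((r - 1) * cols + j) + 1 = start + ((r - 1) * cols + (j + 1)) by ring,
          show (r - 1) * cols + j + 1 = (r - 1) * cols + (j + 1) by ring, step]
      have hsclt : (r - 1) * cols + j < min q (r * cols) := lt_min hscq (by linarith)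
      rw [PySem.List.pyRange_one_cons hsclt]
      simp only [List.map_cons, List.append_assoc, List.singleton_append]
      have hseat : pvSeat ttid area cols start ((r - 1) * cols + j)
          = seatInsert (start + ((r - 1) * cols + j)) ttid (get_row_letter r) (j + 1) area r := by
        simp only [pvSeat, hdiv, hmod]
        rw [show r - 1 + 1 = r by ring]
      rw [hseat, show (r - 1) * cols + (j + 1) = (r - 1) * cols + j + 1 by ring]

theorem pvOuterA_eq (ttid : Int) (area : String) (q cols rows : Int) (start : Int)
    (hcols : 1 ≤ cols) (hq1 : 1 ≤ q) (hqr : q ≤ rows * cols) :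
    ∀ (n : Nat) (r : Int), 1 ≤ r → r ≤ rows + 1 → (rows + 1 - r).toNat = n →
      ∀ ins,
        pvOuterA ttid area q cols (PySem.List.pyRange r (rows + 1) 1)
          (ins, start + min q ((r - 1) * cols), min q ((r - 1) * cols))
        = (ins ++ (PySem.List.pyRange (min q ((r - 1) * cols)) q 1).map (pvSeat ttid area cols start),
           start + q, q) := by
  intro n
  induction n with
  | zero =>
    intro r hr1 hr2 hn ins
    have hre : r = rows + 1 := by omega
    have hrc : (r - 1) * cols = rows * cols := by rw [hre]; ring
    rw [hre, PySem.List.pyRange_one_eq_nil (le_refl _)]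
    simp only [pvOuterA]
    have hm : min q ((rows + 1 - 1) * cols) = q := by
      rw [show (rows + 1 - 1) * cols = rows * cols by ring]
      exact min_eq_left hqr
    rw [hm, PySem.List.pyRange_one_eq_nil (le_refl q)]
    simp
  | succ n ih =>
    intro r hr1 hr2 hn ins
    have hrlt : r ≤ rows := by omega
    rw [PySem.List.pyRange_one_cons (by omega)]
    simp only [pvOuterA]
    by_cases hbreak : min q ((r - 1) * cols) ≥ q
    · have hm : min q ((r - 1) * cols) = q := le_antisymm (min_le_left _ _) hbreak
      simp [hm, PySem.List.pyRange_one_eq_nil (le_refl q)]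
    · simp only [hbreak, if_false]
      have hlt : (r - 1) * cols < q := by
        rcases min_lt_iff.mp (lt_of_not_ge hbreak) with h | h
        · exact absurd h (lt_irrefl q)
        · exact h
      have hsc : min q ((r - 1) * cols) = (r - 1) * cols := min_eq_right (le_of_lt hlt)
      have hrc : (r - 1) * cols + cols = r * cols := by ring
      rw [hsc, show (r - 1) * cols = (r - 1) * cols + 0 by ring,
          show PySem.List.pyRange 1 (cols + 1) 1 = PySem.List.pyRange (0 + 1) (cols + 1) 1 by norm_num,
          pvInnerA_eq ttid area q cols r start hcols hr1 (cols - 0).toNat 0 (by omega) (by omega) rfl (by linarith) ins]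
      have hmin : min q (r * cols) = min q ((r + 1 - 1) * cols) := by
        rw [show (r + 1 - 1) * cols = r * cols by ring]
      rw [hmin, ih (r + 1) (by omega) (by omega) (by omega)]
      have hrc2 : (r + 1 - 1) * cols = (r - 1) * cols + cols := by ring
      have hle1 : (r - 1) * cols + 0 ≤ min q ((r + 1 - 1) * cols) :=
        le_min (by linarith) (by rw [hrc2]; linarith)
      have hle2 : min q ((r + 1 - 1) * cols) ≤ q := min_le_left _ _
      rw [PySem.List.pyRange_one_append _ _ _ hle1 hle2, List.map_append, List.append_assoc]

theorem pvCeilSqrt_pos (q : Int) (hq : 1 ≤ q) : 1 ≤ pvCeilSqrt q := by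
  unfold pvCeilSqrt
  split
  · rename_i h
    have h1 : 1 ≤ q.toNat := by omega
    have hs : 1 ≤ pvSqrtDown q.toNat q.toNat := by
      by_contra hc
      have h0 : pvSqrtDown q.toNat q.toNat = 0 := by omega
      rw [h0] at h
      omega
    omega
  · omega

-- ===== VERDICT =====
theorem generate_seats_for_ticket_type_spec : Claim_equal_generate_seats_for_ticket_type := by
  intro ttid q area start _ hpre
  obtain ⟨hq1, _⟩ := hpre
  unfold Spec_generate_seats_for_ticket_type generate_seats_for_ticket_type generate_seats_for_ticket_type_alt
  dsimp only
  set cols := pvCeilSqrt q with hcolsdef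
  have hcols : 1 ≤ cols := pvCeilSqrt_pos q hq1
  set rows := -(PySem.Int.floordiv (-q) cols) with hrowsdef
  have hrows := (PySem.Int.neg_floordiv_neg_eq_iff_of_pos (b := cols) (a := q) (by omega)).mp hrowsdef.symm
  obtain ⟨hrows1, hrows2⟩ := hrows
  have hrpos : 1 ≤ rows := by nlinarith
  have h0 : min q ((1 - 1) * cols) = 0 := by
    rw [show ((1 : Int) - 1) * cols = 0 by ring]
    exact min_eq_right (by linarith)
  have houter := pvOuterA_eq ttid area q cols rows start hcols hq1 hrows2 (rows + 1 - 1).toNat 1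
    (by omega) (by omega) rfl []
  rw [h0, show start + (0 : Int) = start by ring] at houter
  simp only [List.nil_append] at houter
  rw [houter, pvLoopB_eq]
  simp [add_comm]

@[simp] theorem generate_seats_for_ticket_type_raises : Claim_raises_generate_seats_for_ticket_type := by
  unfold Claim_raises_generate_seats_for_ticket_type
  constructor
  · intro ttid q area start _ hraise hpre
    unfold Raises_generate_seats_for_ticket_type at hraise
    exact absurd hpre.1 (by omega)
  · exact ⟨by decide, by decide, by decide⟩
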